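-- pv_equiv track=rewrite | github.com/oaustegard/eml-executor | eml_sr_distill.py | _rename_variable
-- ===== SOURCE A (Python) =====
-- def _rename_variable(expr: str, old: str, new: str) -> str:
--     """Substitute whole-token occurrences of `old` with `new` in a string.
--
--     Lightweight tokeniser: expressions emitted by the simplifier are in a
--     restricted alphabet (identifiers, parens, commas, operators, whitespace).
--     We avoid pulling in `re` by scanning character classes directly.
--     """
--     out = []
--     i = 0
--     n = len(expr)
--     while i < n:
--         c = expr[i]
--         if c.isalpha() or c == "_":
--             j = i
--             while j < n and (expr[j].isalnum() or expr[j] == "_"):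
--                 j += 1
--             token = expr[i:j]
--             out.append(new if token == old else token)
--             i = j
--         else:
--             out.append(c)
--             i += 1
--     return "".join(out)
-- ===== SOURCE B (Python) =====
-- def _rename_variable(expr: str, old: str, new: str) -> str:
--     """Single streaming pass with a pending-identifier buffer (state machine),
--     instead of index arithmetic with an inner scan and slicing."""
--     out = []
--     buf = []
--     for c in expr:
--         if buf:
--             if c.isalnum() or c == "_":
--                 buf.append(c)
--                 continue
--             tok = "".join(buf)
--             out.append(new if tok == old else tok)
--             buf = []
--         if c.isalpha() or c == "_":
--             buf.append(c)
--         else: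
--             out.append(c)
--     if buf:
--         tok = "".join(buf)
--         out.append(new if tok == old else tok)
--     return "".join(out)
-- ===== Notes on version B (the rewrite author's own statement) =====
-- stated objective: alternative
-- what changed: Replaced the index-based scanner with a nested inner while-loop and slice extraction by a single for-loop state machine that maintains a pending-identifier buffer and flushes it at class boundaries and at end of input.
import Mathlib
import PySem

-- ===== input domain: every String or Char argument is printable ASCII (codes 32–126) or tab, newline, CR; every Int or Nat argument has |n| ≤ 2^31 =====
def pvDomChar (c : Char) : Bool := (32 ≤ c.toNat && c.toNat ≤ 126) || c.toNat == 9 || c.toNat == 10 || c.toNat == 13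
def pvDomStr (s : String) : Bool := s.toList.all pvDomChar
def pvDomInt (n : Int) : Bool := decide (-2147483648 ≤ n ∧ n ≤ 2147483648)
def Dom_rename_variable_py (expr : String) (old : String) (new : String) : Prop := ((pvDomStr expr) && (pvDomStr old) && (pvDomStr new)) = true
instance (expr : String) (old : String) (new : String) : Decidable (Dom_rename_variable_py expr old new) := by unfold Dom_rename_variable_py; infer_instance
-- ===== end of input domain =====

-- B replaces A's index-based scanner (nested inner while + slicing) by a single
-- buffered fold (pending-identifier state machine); alternative structure, same cost.


-- shared character classes (exact for the ASCII domain: Python's c.isalpha()/c.isalnum() on ASCII)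
def pyIdentStart (c : Char) : Bool := c.isAlpha || c == '_'
def pyIdentChar (c : Char) : Bool := c.isAlphanum || c == '_'

-- ===== PORT A =====
-- A's while loop over index i, with the inner while (takeWhile/dropWhile = expr[i:j] and the jump i := j)
def renameGoA (old new : String) : List Char → List String
  | [] => []
  | c :: rest =>
    if pyIdentStart c then
      let token := String.ofList (c :: rest.takeWhile pyIdentChar)
      (if token = old then new else token) :: renameGoA old new (rest.dropWhile pyIdentChar)
    else
      String.ofList [c] :: renameGoA old new rest
termination_by cs => cs.length
decreasing_by
  · have := List.length_dropWhile_le pyIdentChar rest; simp; omega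
  · simp

def rename_variable_py (expr : String) (old : String) (new : String) : String :=
  String.join (renameGoA old new expr.toList)

-- ===== PORT B =====
-- one fold step of Source B's for-loop body; state = (out, buf)
def renameStepB (old new : String) (s : List String × List Char) (c : Char) : List String × List Char :=
  let (out, buf) := s
  if buf.isEmpty = false then
    if pyIdentChar c then (out, buf ++ [c])          -- buf.append(c); continue
    else
      let tok := String.ofList buf
      let out := out ++ [if tok = old then new else tok]
      if pyIdentStart c then (out, [c]) else (out ++ [String.ofList [c]], [])
  else
    if pyIdentStart c then (out, [c]) else (out ++ [String.ofList [c]], [])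

-- Source B's trailing 'if buf: out.append(new if tok == old else tok)'
def renameFlushB (old new : String) (s : List String × List Char) : List String :=
  if s.2.isEmpty then s.1
  else s.1 ++ [if String.ofList s.2 = old then new else String.ofList s.2]

def rename_variable_py_alt (expr : String) (old : String) (new : String) : String :=
  String.join (renameFlushB old new (expr.toList.foldl (renameStepB old new) ([], [])))

-- ===== PRECONDITION & SPEC =====
def Spec_rename_variable_py (expr : String) (old : String) (new : String) (out : String) : Prop := out = rename_variable_py_alt expr old new
instance (expr : String) (old : String) (new : String) (out : String) : Decidable (Spec_rename_variable_py expr old new out) := by unfold Spec_rename_variable_py; infer_instance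

-- ===== CLAIM (what is proved, stated in full; the proofs are below) =====
def Claim_equal_rename_variable_py : Prop := ∀ (expr : String) (old : String) (new : String), Dom_rename_variable_py expr old new → Spec_rename_variable_py expr old new (rename_variable_py expr old new)

-- ===== LEMMAS AND PROOFS =====

theorem identStart_identChar {c : Char} (h : pyIdentStart c = true) : pyIdentChar c = true := by
  simp [pyIdentStart, pyIdentChar, Char.isAlphanum] at *
  rcases h with h | h
  · exact Or.inl (Or.inl h)
  · exact Or.inr h

-- the joint invariant: fold from an empty buffer realises renameGoA; from a nonempty
-- buffer it first completes the pending token (takeWhile) and then continues.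
theorem fold_invariant (old new : String) (cs : List Char) :
    (∀ out, renameFlushB old new (cs.foldl (renameStepB old new) (out, [])) =
      out ++ renameGoA old new cs) ∧
    (∀ out (b : List Char), b ≠ [] →
      renameFlushB old new (cs.foldl (renameStepB old new) (out, b)) =
      out ++ [if String.ofList (b ++ cs.takeWhile pyIdentChar) = old then new
              else String.ofList (b ++ cs.takeWhile pyIdentChar)]
          ++ renameGoA old new (cs.dropWhile pyIdentChar)) := by
  induction cs with
  | nil =>
    constructor
    · intro out; simp [renameFlushB, renameGoA]
    · intro out b hb
      simp [renameFlushB, renameGoA, hb]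
  | cons c cs ih =>
    obtain ⟨ihE, ihN⟩ := ih
    constructor
    · intro out
      by_cases hs : pyIdentStart c = true
      · have hc := identStart_identChar hs
        have step : renameStepB old new (out, []) c = (out, [c]) := by
          simp [renameStepB, hs]
        rw [List.foldl_cons, step, ihN out [c] (by simp)]
        rw [renameGoA]
        simp [hs]
      · have hs' : pyIdentStart c = false := by simpa using hs
        have step : renameStepB old new (out, []) c = (out ++ [String.ofList [c]], []) := by
          simp [renameStepB, hs']
        rw [List.foldl_cons, step, ihE]
        rw [renameGoA]
        simp [hs']
    · intro out b hb
      have hbe : b.isEmpty = false := by simp [hb]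
      by_cases hc : pyIdentChar c = true
      · have step : renameStepB old new (out, b) c = (out, b ++ [c]) := by
          simp [renameStepB, hbe, hc]
        rw [List.foldl_cons, step, ihN out (b ++ [c]) (by simp)]
        simp [List.takeWhile, List.dropWhile, hc]
      · have hc' : pyIdentChar c = false := by simpa using hc
        have hs' : pyIdentStart c = false := by
          by_contra h
          have := identStart_identChar (by simpa using h : pyIdentStart c = true)
          rw [hc'] at this; exact Bool.false_ne_true this
        have step : renameStepB old new (out, b) c =
            (out ++ [if String.ofList b = old then new else String.ofList b]
                 ++ [String.ofList [c]], []) := by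
          simp [renameStepB, hbe, hc', hs']
        rw [List.foldl_cons, step, ihE]
        simp only [List.takeWhile_cons, List.dropWhile_cons, hc', Bool.false_eq_true,
          if_false]
        rw [renameGoA]
        simp [hs']

-- ===== VERDICT (by name: the statement is the Claim_ definition above) =====
theorem rename_variable_py_spec : Claim_equal_rename_variable_py := by
  intro expr old new _
  unfold Spec_rename_variable_py rename_variable_py rename_variable_py_alt
  rw [(fold_invariant old new expr.toList).1 []]
  simp
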